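-- pv_equiv track=rewrite | github.com/geogreck/ics9-compilers | module3/lab3/main.py | parse_char
-- ===== SOURCE A (Python) =====
-- symbs_by_code = ["NUL", "SOH", "STX", "ETX", "EOT", "ENQ", "ACK", "BEL", "BS", "TAB", "LF", "VT",
--                  "FF", "CR", "SO", "SI", "DLE", "DC1", "DC2", "DC3", "DC4", "NAK", "SYN", "ETB",
--                  "CAN", "EM", "SUB", "ESC", "FS", "GS", "RS", "US"]
--
-- def parse_char(x) -> str:
--     x = str(x)
--     for i in range(len(symbs_by_code)):
--         tmpl = "#{}".format(symbs_by_code[i])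
--         if x[1:1 + len(tmpl)] == tmpl:
--             return chr(i)
--         tmpl = "#{{{}}}".format(format(i, 'x').upper())
--         if x[1:1 + len(tmpl)] == tmpl:
--             return chr(i)
--     x = x[1:2]
--     return x
-- ===== SOURCE B (Python) =====
-- symbs_by_code = ["NUL", "SOH", "STX", "ETX", "EOT", "ENQ", "ACK", "BEL", "BS", "TAB", "LF", "VT",
--                  "FF", "CR", "SO", "SI", "DLE", "DC1", "DC2", "DC3", "DC4", "NAK", "SYN", "ETB",
--                  "CAN", "EM", "SUB", "ESC", "FS", "GS", "RS", "US"]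
--
-- _codes = {}
-- for _i, _name in enumerate(symbs_by_code):
--     _codes["#" + _name] = _i
--     _codes["#{" + format(_i, "x").upper() + "}"] = _i
--
--
-- def parse_char(x) -> str:
--     s = str(x)
--     for L in (5, 4, 3):
--         code = _codes.get(s[1:1 + L])
--         if code is not None:
--             return chr(code)
--     return s[1:2]
-- ===== Notes on version B (the rewrite author's own statement) =====
-- stated objective: idiomatic
-- what changed: A rebuilds and compares up to 64 template strings in a 32-iteration loop on every call; B builds a dict of all 64 templates once at module level and answers each call with at most three dict probes (one per possible template length, longest first, which reproduces A's scan-order priority since the only prefix-overlapping pair #SO/#SOH has the longer template earlier in A's order).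
import Mathlib
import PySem

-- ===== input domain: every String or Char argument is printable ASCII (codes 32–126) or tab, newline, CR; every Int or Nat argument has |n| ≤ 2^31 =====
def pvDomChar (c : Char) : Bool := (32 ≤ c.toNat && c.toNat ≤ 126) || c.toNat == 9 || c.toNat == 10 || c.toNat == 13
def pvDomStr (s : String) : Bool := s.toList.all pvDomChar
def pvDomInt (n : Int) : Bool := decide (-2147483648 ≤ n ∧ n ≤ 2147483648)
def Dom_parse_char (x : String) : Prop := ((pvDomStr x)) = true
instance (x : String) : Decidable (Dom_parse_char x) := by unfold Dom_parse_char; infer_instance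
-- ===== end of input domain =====

-- B replaces A's 32-iteration template-building scan by a dict of the 64 templates built once at
-- module level, probed with the three possible template lengths longest-first (objective: idiomatic).

-- ===== PORT A =====
def symbs_by_code : List String :=
  ["NUL", "SOH", "STX", "ETX", "EOT", "ENQ", "ACK", "BEL", "BS", "TAB", "LF", "VT", "FF", "CR", "SO", "SI", "DLE", "DC1", "DC2", "DC3", "DC4", "NAK", "SYN", "ETB", "CAN", "EM", "SUB", "ESC", "FS", "GS", "RS", "US"]

def hexDigitsU : List Char := ['0','1','2','3','4','5','6','7','8','9','A','B','C','D','E','F']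

-- hand port of format(i, 'x').upper(): exact for 0 ≤ i < 256; only called with i in range(32)
def hexU (i : Int) : String :=
  if i < 16 then String.ofList [(PySem.List.pyGet? hexDigitsU i).getD '0']
  else String.ofList [(PySem.List.pyGet? hexDigitsU (PySem.Int.floordiv i 16)).getD '0',
                  (PySem.List.pyGet? hexDigitsU (PySem.Int.mod i 16)).getD '0']

-- for-loop with early return; str(x) is the identity on a str argument; chr(i) = Char.ofNat i.toNat (exact: 0 ≤ i < 32)
def parse_char_loop (x : String) : List Int → String
  | [] => PySem.Str.slice x (some 1) (some 2)
  | i :: rest =>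
    let tmpl1 := "#" ++ (PySem.List.pyGet? symbs_by_code i).getD ""
    if PySem.Str.slice x (some 1) (some (1 + PySem.Str.len tmpl1)) == tmpl1 then
      String.ofList [Char.ofNat i.toNat]
    else
      let tmpl2 := "#{" ++ hexU i ++ "}"
      if PySem.Str.slice x (some 1) (some (1 + PySem.Str.len tmpl2)) == tmpl2 then
        String.ofList [Char.ofNat i.toNat]
      else parse_char_loop x rest

def parse_char (x : String) : String :=
  parse_char_loop x (PySem.List.pyRange 0 ((symbs_by_code.length : Int)) 1)

-- ===== PORT B =====
-- module-level dict build: for i, name in enumerate(symbs_by_code) (enumerate ported via zipIdx, components swapped)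
def codes_dict : PySem.Dict String Int :=
  symbs_by_code.zipIdx.foldl
    (fun d p => (d.insert ("#" ++ p.1) (p.2 : Int)).insert ("#{" ++ hexU (p.2 : Int) ++ "}") (p.2 : Int))
    PySem.Dict.empty

def parse_char_alt_loop (d : PySem.Dict String Int) (x : String) : List Int → String
  | [] => PySem.Str.slice x (some 1) (some 2)
  | L :: rest =>
    match d.get? (PySem.Str.slice x (some 1) (some (1 + L))) with
    | some c => String.ofList [Char.ofNat c.toNat]
    | none => parse_char_alt_loop d x rest

def parse_char_alt (x : String) : String := parse_char_alt_loop codes_dict x [5, 4, 3]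

-- ===== PRECONDITION & SPEC =====
def Spec_parse_char (x : String) (out : String) : Prop := out = parse_char_alt x
instance (x : String) (out : String) : Decidable (Spec_parse_char x out) := by unfold Spec_parse_char; infer_instance

-- ===== CLAIM (what is proved, stated in full; the proofs are below) =====
def Claim_equal_parse_char : Prop := ∀ (x : String), Dom_parse_char x → Spec_parse_char x (parse_char x)

-- ===== LEMMAS AND PROOFS =====

-- the 64 (template, code) pairs, in A's scan order (= the insertion order of B's dict)
def T : List (List Char × Nat) := [
  (['#', 'N', 'U', 'L'], 0), (['#', '{', '0', '}'], 0),
  (['#', 'S', 'O', 'H'], 1), (['#', '{', '1', '}'], 1),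
  (['#', 'S', 'T', 'X'], 2), (['#', '{', '2', '}'], 2),
  (['#', 'E', 'T', 'X'], 3), (['#', '{', '3', '}'], 3),
  (['#', 'E', 'O', 'T'], 4), (['#', '{', '4', '}'], 4),
  (['#', 'E', 'N', 'Q'], 5), (['#', '{', '5', '}'], 5),
  (['#', 'A', 'C', 'K'], 6), (['#', '{', '6', '}'], 6),
  (['#', 'B', 'E', 'L'], 7), (['#', '{', '7', '}'], 7),
  (['#', 'B', 'S'], 8), (['#', '{', '8', '}'], 8),
  (['#', 'T', 'A', 'B'], 9), (['#', '{', '9', '}'], 9),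
  (['#', 'L', 'F'], 10), (['#', '{', 'A', '}'], 10),
  (['#', 'V', 'T'], 11), (['#', '{', 'B', '}'], 11),
  (['#', 'F', 'F'], 12), (['#', '{', 'C', '}'], 12),
  (['#', 'C', 'R'], 13), (['#', '{', 'D', '}'], 13),
  (['#', 'S', 'O'], 14), (['#', '{', 'E', '}'], 14),
  (['#', 'S', 'I'], 15), (['#', '{', 'F', '}'], 15),
  (['#', 'D', 'L', 'E'], 16), (['#', '{', '1', '0', '}'], 16),
  (['#', 'D', 'C', '1'], 17), (['#', '{', '1', '1', '}'], 17),
  (['#', 'D', 'C', '2'], 18), (['#', '{', '1', '2', '}'], 18),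
  (['#', 'D', 'C', '3'], 19), (['#', '{', '1', '3', '}'], 19),
  (['#', 'D', 'C', '4'], 20), (['#', '{', '1', '4', '}'], 20),
  (['#', 'N', 'A', 'K'], 21), (['#', '{', '1', '5', '}'], 21),
  (['#', 'S', 'Y', 'N'], 22), (['#', '{', '1', '6', '}'], 22),
  (['#', 'E', 'T', 'B'], 23), (['#', '{', '1', '7', '}'], 23),
  (['#', 'C', 'A', 'N'], 24), (['#', '{', '1', '8', '}'], 24),
  (['#', 'E', 'M'], 25), (['#', '{', '1', '9', '}'], 25),
  (['#', 'S', 'U', 'B'], 26), (['#', '{', '1', 'A', '}'], 26),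
  (['#', 'E', 'S', 'C'], 27), (['#', '{', '1', 'B', '}'], 27),
  (['#', 'F', 'S'], 28), (['#', '{', '1', 'C', '}'], 28),
  (['#', 'G', 'S'], 29), (['#', '{', '1', 'D', '}'], 29),
  (['#', 'R', 'S'], 30), (['#', '{', '1', 'E', '}'], 30),
  (['#', 'U', 'S'], 31), (['#', '{', '1', 'F', '}'], 31)
]

def chOut (c : Nat) : String := String.ofList [Char.ofNat c]

def mP (cs : List Char) (p : List Char × Nat) : Bool := decide (cs.take p.1.length = p.1)

def selA (cs : List Char) : Option (List Char × Nat) := T.find? (mP cs)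

def probe (cs : List Char) (L : Nat) : Option (List Char × Nat) :=
  T.find? (fun p => decide (cs.take L = p.1))

def selB (cs : List Char) : Option (List Char × Nat) :=
  match probe cs 5 with
  | some p => some p
  | none => match probe cs 4 with
    | some p => some p
    | none => probe cs 3

def buildT (l : List Int) : List (List Char × Nat) :=
  l.flatMap (fun i =>
    [((("#" ++ (PySem.List.pyGet? symbs_by_code i).getD "") : String).toList, i.toNat),
     ((("#{" ++ hexU i ++ "}") : String).toList, i.toNat)])

theorem beq_str (s t : String) : (s == t) = decide (s.toList = t.toList) := by
  rcases h : s == t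
  · simp only [beq_eq_false_iff_ne] at h
    exact (decide_eq_false fun hh => h (String.toList_inj.mp hh)).symm
  · simp only [beq_iff_eq] at h
    simp [h]

theorem slice_toList (x : String) (n : Nat) :
    (PySem.Str.slice x (some 1) (some (1 + (n : Int)))).toList = (x.toList.drop 1).take n := by
  simp [PySem.Str.slice]
  simpa using PySem.List.slice_natCast_add (xs := x.toList) (j := 1) (n := n)

theorem cond_eq (x t : String) :
    (PySem.Str.slice x (some 1) (some (1 + PySem.Str.len t)) == t)
      = decide ((x.toList.drop 1).take t.toList.length = t.toList) := by
  have hlen : PySem.Str.len t = ((t.toList.length : Nat) : Int) := by simp [PySem.Str.len]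
  rw [hlen, beq_str, slice_toList]

theorem loopA (x : String) (l : List Int) :
    parse_char_loop x l =
      match (buildT l).find? (mP (x.toList.drop 1)) with
      | some p => chOut p.2
      | none => PySem.Str.slice x (some 1) (some 2) := by
  induction l with
  | nil => rfl
  | cons i rest ih =>
    rw [parse_char_loop]
    have hb : buildT (i :: rest) =
        ((("#" ++ (PySem.List.pyGet? symbs_by_code i).getD "") : String).toList, i.toNat)
          :: ((("#{" ++ hexU i ++ "}") : String).toList, i.toNat) :: buildT rest := by
      simp [buildT]
    rw [hb]
    simp only [cond_eq, List.find?_cons, mP]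
    split_ifs with h1 h2 <;> simp_all [chOut]

set_option maxRecDepth 40000 in
theorem redA (x : String) :
    parse_char x =
      match selA (x.toList.drop 1) with
      | some p => chOut p.2
      | none => PySem.Str.slice x (some 1) (some 2) := by
  have hT : buildT (PySem.List.pyRange 0 ((symbs_by_code.length : Int)) 1) = T := by decide
  rw [parse_char, loopA, hT, selA]

theorem get?_mk (l : List (String × Int)) (s : String) :
    (PySem.Dict.mk l).get? s = (l.find? (fun q => q.1 == s)).map (·.2) := by
  induction l with
  | nil => rfl
  | cons kv t ih =>
    obtain ⟨k, v⟩ := kv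
    by_cases hk : k = s <;> simp [PySem.Dict.get?_mk_cons, hk, ih]

set_option maxRecDepth 40000 in
theorem probe_via_items (cs : List Char) (L : Nat) (s : String) (hs : s.toList = cs.take L) :
    probe cs L = (codes_dict.items.find? (fun q => q.1 == s)).map
      (fun q => (q.1.toList, q.2.toNat)) := by
  have hmap : codes_dict.items.map (fun q => ((q.1 : String).toList, q.2.toNat)) = T := by decide
  rw [probe, ← hmap, List.find?_map]
  have hfun : ((fun p : List Char × Nat => decide (cs.take L = p.1)) ∘
      (fun q : String × Int => (q.1.toList, q.2.toNat))) = (fun q : String × Int => q.1 == s) := by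
    funext q
    simp only [Function.comp]
    rw [beq_str, decide_eq_decide, hs, eq_comm]
  rw [hfun]

set_option maxRecDepth 400000 in
theorem redB (x : String) :
    parse_char_alt x =
      match selB (x.toList.drop 1) with
      | some p => chOut p.2
      | none => PySem.Str.slice x (some 1) (some 2) := by
  have hitems : codes_dict = PySem.Dict.mk codes_dict.items := PySem.Dict.ext rfl
  have h5 : (PySem.Str.slice x (some 1) (some (1 + (5:Int)))).toList = (x.toList.drop 1).take 5 := by
    simpa using slice_toList x 5
  have h4 : (PySem.Str.slice x (some 1) (some (1 + (4:Int)))).toList = (x.toList.drop 1).take 4 := by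
    simpa using slice_toList x 4
  have h3 : (PySem.Str.slice x (some 1) (some (1 + (3:Int)))).toList = (x.toList.drop 1).take 3 := by
    simpa using slice_toList x 3
  have p5 := probe_via_items (x.toList.drop 1) 5 _ h5
  have p4 := probe_via_items (x.toList.drop 1) 4 _ h4
  have p3 := probe_via_items (x.toList.drop 1) 3 _ h3
  rw [selB, p5, p4, p3]
  rcases hf5 : codes_dict.items.find? (fun q => q.1 == PySem.Str.slice x (some 1) (some (1 + (5:Int)))) with _ | q5
  all_goals rcases hf4 : codes_dict.items.find? (fun q => q.1 == PySem.Str.slice x (some 1) (some (1 + (4:Int)))) with _ | q4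
  all_goals rcases hf3 : codes_dict.items.find? (fun q => q.1 == PySem.Str.slice x (some 1) (some (1 + (3:Int)))) with _ | q3
  all_goals rw [parse_char_alt, hitems]
  all_goals simp only [parse_char_alt_loop, get?_mk, hf5, hf4, hf3, Option.map_none, Option.map_some, chOut]

-- ---- combinatorial facts about the template table, by computation ----
set_option maxRecDepth 40000 in
theorem T_prefix_unique : ∀ p ∈ T, ∀ q ∈ T, p.1 = q.1.take p.1.length →
    (p = q ∨ (p.1 = ['#','S','O'] ∧ q.1 = ['#','S','O','H'])) := by decide

set_option maxRecDepth 40000 in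
theorem T_lengths : ∀ p ∈ T, p.1.length = 3 ∨ p.1.length = 4 ∨ p.1.length = 5 := by decide

set_option maxRecDepth 40000 in
theorem T_no5_SOH : ∀ p ∈ T, ¬(p.1.length = 5 ∧ p.1.take 4 = ['#','S','O','H']) := by decide

theorem m_of_take {cs t : List Char} {L : Nat} (hc : cs.take L = t) : cs.take t.length = t := by
  have hl : t.length ≤ L := by
    rw [← hc, List.length_take]; exact min_le_left _ _
  calc cs.take t.length = (cs.take L).take t.length := by
        rw [List.take_take, min_eq_left hl]
    _ = t := by rw [hc, List.take_length]

theorem find?_eq_some_of_unique {α : Type} (pr : α → Bool) (l : List α) (a : α)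
    (ha : a ∈ l) (hpa : pr a = true) (hu : ∀ b ∈ l, pr b = true → b = a) :
    l.find? pr = some a := by
  induction l with
  | nil => cases ha
  | cons b t ih =>
    by_cases hb : pr b = true
    · rw [List.find?_cons_of_pos hb, hu b (List.mem_cons_self) hb]
    · rcases List.mem_cons.mp ha with rfl | ha'
      · exact absurd hpa hb
      · rw [List.find?_cons_of_neg hb]
        exact ih ha' (fun q hq => hu q (List.mem_cons_of_mem _ hq))

set_option maxRecDepth 40000 in
theorem sel_eq (cs : List Char) : selA cs = selB cs := by
  by_cases h : cs.take 4 = ['#','S','O','H']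
  · -- the only overlapping template pair: both sides pick ("#SOH", 1)
    have hA : selA cs = some (['#','S','O','H'], 1) := by
      rw [selA, T]
      rw [List.find?_cons_of_neg (by simp [mP, h]), List.find?_cons_of_neg (by simp [mP, h]),
          List.find?_cons_of_pos (by simp [mP, h])]
    by_cases h5 : 5 ≤ cs.length
    · have hp5 : probe cs 5 = none := by
        apply List.find?_eq_none.mpr
        intro p hp hc
        have hc' : cs.take 5 = p.1 := by simpa using hc
        have hl5 : p.1.length = 5 := by
          rw [← hc', List.length_take]; omega
        have ht4 : p.1.take 4 = ['#','S','O','H'] := by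
          rw [← hc', List.take_take]; simpa using h
        exact T_no5_SOH p hp ⟨hl5, ht4⟩
      have hp4 : probe cs 4 = some (['#','S','O','H'], 1) := by
        rw [probe, T]
        rw [List.find?_cons_of_neg (by simp [h]), List.find?_cons_of_neg (by simp [h]),
            List.find?_cons_of_pos (by simp [h])]
      rw [hA, selB, hp5, hp4]
    · have hcs : cs = ['#','S','O','H'] := by
        rw [← h]
        exact (List.take_of_length_le (by omega)).symm
      rw [hA, hcs]
      decide
  · rcases hsel : selA cs with _ | p
    · have hnone := List.find?_eq_none.mp hsel
      have hprobe : ∀ L : Nat, probe cs L = none := by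
        intro L
        apply List.find?_eq_none.mpr
        intro p hp hc
        have hc' : cs.take L = p.1 := by simpa using hc
        exact hnone p hp (by simp [mP, m_of_take hc'])
      rw [selB, hprobe 5, hprobe 4, hprobe 3]
    · have hpT : p ∈ T := List.mem_of_find?_eq_some hsel
      have hmp : mP cs p = true := List.find?_some hsel
      have hm : cs.take p.1.length = p.1 := by simpa [mP] using hmp
      have uniq : ∀ q ∈ T, cs.take q.1.length = q.1 → q = p := by
        intro q hq hmq
        rcases le_total q.1.length p.1.length with hle | hle
        · have hpref : q.1 = p.1.take q.1.length := by
            have htt : (cs.take p.1.length).take q.1.length = cs.take q.1.length := by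
              rw [List.take_take, min_eq_left hle]
            calc q.1 = cs.take q.1.length := hmq.symm
              _ = (cs.take p.1.length).take q.1.length := htt.symm
              _ = p.1.take q.1.length := by rw [hm]
          rcases T_prefix_unique q hq p hpT hpref with heq | ⟨_, hps⟩
          · exact heq
          · exfalso; apply h; rw [hps] at hm; simpa using hm
        · have hpref : p.1 = q.1.take p.1.length := by
            have htt : (cs.take q.1.length).take p.1.length = cs.take p.1.length := by
              rw [List.take_take, min_eq_left hle]
            calc p.1 = cs.take p.1.length := hm.symm
              _ = (cs.take q.1.length).take p.1.length := htt.symm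
              _ = q.1.take p.1.length := by rw [hmq]
          rcases T_prefix_unique p hpT q hq hpref with heq | ⟨_, hqs⟩
          · exact heq.symm
          · exfalso; apply h; rw [hqs] at hmq; simpa using hmq
      have hopt : ∀ L : Nat, probe cs L = none ∨ probe cs L = some p := by
        intro L
        rcases hf : probe cs L with _ | r
        · exact Or.inl rfl
        · right
          have hrT := List.mem_of_find?_eq_some hf
          have hr := List.find?_some hf
          have hr' : cs.take L = r.1 := by simpa using hr
          rw [uniq r hrT (m_of_take hr')]
      have hat : probe cs p.1.length = some p := by
        apply find?_eq_some_of_unique _ _ _ hpT (by simp [hm])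
        intro q hq hcq
        have hcq' : cs.take p.1.length = q.1 := by simpa using hcq
        exact uniq q hq (m_of_take hcq')
      rw [selB]
      rcases T_lengths p hpT with hL | hL | hL
      · rcases hopt 5 with e | e <;> rw [e]
        · rcases hopt 4 with e4 | e4 <;> rw [e4]
          rw [hL] at hat
          rw [hat]
      · rcases hopt 5 with e | e <;> rw [e]
        rw [hL] at hat
        rw [hat]
      · rw [hL] at hat
        rw [hat]

-- ===== VERDICT (by name: the statement is the Claim_ definition above) =====
theorem parse_char_spec : Claim_equal_parse_char := by
  intro x _
  unfold Spec_parse_char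
  rw [redA, redB, sel_eq]
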